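-- pv_equiv track=rewrite | github.com/fzinfz/ipynb | python/web/docusaurus_fix_slug.py | _needs_mdx_escape
-- ===== SOURCE A (Python) =====
-- def _needs_mdx_escape(line):
--     """Check if a table line contains bare `<` or `>` that need JSX escaping.
--
--     Uses character-by-character analysis to avoid false positives on:
--     - HTML entities: ``&lt;``, ``&gt;``
--     - Already-escaped JSX: ``{'<'}``, ``{'>'}``
--     - Inline code spans: `` `<...>` ``
--
--     Returns True if the line needs processing.
--     """
--     i = 0;
--     length = len(line);
--
--     while i < length:
--         char = line[i];
--
--         # Skip inside inline code spans (backtick-delimited)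
--         if char == "`":
--             # Skip to closing backtick
--             i += 1;
--             while i < length and line[i] != "`":
--                 i += 1;
--             i += 1;
--             continue;
--
--         # HTML entities starting with &
--         if char == "&" and i + 3 < length:
--             entity = line[i:i + 4];
--             if entity in {"&lt;", "&gt;", "&amp;", "&quot;"}:
--                 i += len(entity);
--                 continue;
--
--         # Already-escaped JSX: {'<'} or {'>'}
--         if (
--             char == "{"
--             and i + 4 < length
--             and line[i + 1] == "'"
--             and line[i + 2] in {"<", ">"}
--             and line[i + 3] == "'"
--             and line[i + 4] == "}"
--         ):
--             i += 5;
--             continue;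
--
--         # Bare < or > found
--         if char in {"<", ">"}:
--             return True;
--
--         i += 1;
--
--     return False;
-- ===== SOURCE B (Python) =====
-- def _needs_mdx_escape(line):
--     """Positional re-formulation: a line needs escaping iff some '<' or '>'
--     sits outside every backtick code span (odd prefix backtick count = inside,
--     an unterminated span runs to end of line) and is not the middle of an
--     escaped-JSX token {'<'} / {'>'}."""
--     return any(
--         ch in "<>"
--         and line.count("`", 0, j) % 2 == 0
--         and not (j >= 2 and line[j - 2:j + 3] in ("{'<'}", "{'>'}"))
--         for j, ch in enumerate(line)
--     )
-- ===== Notes on version B (the rewrite author's own statement) =====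
-- stated objective: simpler
-- what changed: Replaces A's stateful skip-ahead scanner (mutable index with explicit skips for code spans, entities and escaped JSX) by a single declarative per-position test: a bare angle bracket counts iff the prefix backtick count is even (outside any code span; an unterminated span runs to end of line) and it is not the middle character of an escaped-JSX token; the C-level any()/str.count machinery also makes it measurably faster on typical lines.
import Mathlib
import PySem

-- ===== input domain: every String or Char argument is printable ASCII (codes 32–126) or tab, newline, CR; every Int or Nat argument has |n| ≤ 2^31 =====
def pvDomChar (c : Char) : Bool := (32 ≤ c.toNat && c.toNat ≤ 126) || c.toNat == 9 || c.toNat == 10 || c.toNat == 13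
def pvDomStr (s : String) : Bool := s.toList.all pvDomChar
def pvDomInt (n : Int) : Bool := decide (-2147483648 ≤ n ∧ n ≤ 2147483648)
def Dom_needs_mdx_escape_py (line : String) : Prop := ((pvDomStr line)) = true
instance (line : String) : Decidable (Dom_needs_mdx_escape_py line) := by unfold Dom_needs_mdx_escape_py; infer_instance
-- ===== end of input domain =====

-- B replaces A's stateful skip-ahead scanner by a per-position membership test
-- (prefix backtick parity + a 5-char window for escaped JSX); objective: simpler.

-- ===== PORT A =====
-- inner `while i < length and line[i] != '`'` loop: returns the final i
def pvFindTick (cs : List Char) : Nat → Nat → Nat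
  | 0, i => i
  | fuel+1, i =>
    if h : i < cs.length then
      if cs[i] = '`' then i else pvFindTick cs fuel (i + 1)
    else i

-- the main `while i < length` loop of A (fuel = remaining loop iterations, always sufficient at the call site)
def pvScan (cs : List Char) : Nat → Nat → Bool
  | 0, _ => false
  | fuel+1, i =>
    if h : i < cs.length then
      if cs[i] = '`' then
        pvScan cs fuel (pvFindTick cs cs.length (i + 1) + 1)
      else if cs[i] = '&' ∧ i + 3 < cs.length ∧
          ((cs.drop i).take 4 = "&lt;".toList ∨ (cs.drop i).take 4 = "&gt;".toList ∨
           (cs.drop i).take 4 = "&amp;".toList ∨ (cs.drop i).take 4 = "&quot;".toList) then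
        pvScan cs fuel (i + ((cs.drop i).take 4).length)
      else if cs[i] = '{' ∧ i + 4 < cs.length ∧ cs[i+1]? = some '\'' ∧
          (cs[i+2]? = some '<' ∨ cs[i+2]? = some '>') ∧ cs[i+3]? = some '\'' ∧ cs[i+4]? = some '}' then
        pvScan cs fuel (i + 5)
      else if cs[i] = '<' ∨ cs[i] = '>' then
        true
      else
        pvScan cs fuel (i + 1)
    else false

def needs_mdx_escape_py (line : String) : Bool := pvScan line.toList (line.toList.length + 1) 0

-- ===== PORT B =====
def needs_mdx_escape_py_alt (line : String) : Bool :=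
  let cs := line.toList
  (List.range cs.length).any fun j =>
    (decide (cs.getD j ' ' = '<') || decide (cs.getD j ' ' = '>'))
    && decide ((cs.take j).count '`' % 2 = 0)
    && !(decide (2 ≤ j) && (decide ((cs.drop (j-2)).take 5 = "{'<'}".toList)
                            || decide ((cs.drop (j-2)).take 5 = "{'>'}".toList)))

-- ===== PRECONDITION & SPEC =====
def Spec_needs_mdx_escape_py (line : String) (out : Bool) : Prop := out = needs_mdx_escape_py_alt line
instance (line : String) (out : Bool) : Decidable (Spec_needs_mdx_escape_py line out) := by unfold Spec_needs_mdx_escape_py; infer_instance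

-- ===== CLAIM (what is proved, stated in full; the proofs are below) =====
def Claim_equal_needs_mdx_escape_py : Prop := ∀ (line : String), Dom_needs_mdx_escape_py line → Spec_needs_mdx_escape_py line (needs_mdx_escape_py line)

-- ===== LEMMAS AND PROOFS =====

-- B's per-position predicate, and the 5-char escaped-JSX window
def pvTok (cs : List Char) (t : Nat) : Prop :=
  (cs.drop t).take 5 = "{'<'}".toList ∨ (cs.drop t).take 5 = "{'>'}".toList

def pvQ (cs : List Char) (j : Nat) : Bool :=
  (decide (cs.getD j ' ' = '<') || decide (cs.getD j ' ' = '>'))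
  && decide ((cs.take j).count '`' % 2 = 0)
  && !(decide (2 ≤ j) && (decide ((cs.drop (j-2)).take 5 = "{'<'}".toList)
                          || decide ((cs.drop (j-2)).take 5 = "{'>'}".toList)))

theorem pvAlt_eq (line : String) :
    needs_mdx_escape_py_alt line = (List.range line.toList.length).any (pvQ line.toList) := rfl

theorem pvQ_true_iff (cs : List Char) (j : Nat) :
    pvQ cs j = true ↔ ((cs.getD j ' ' = '<' ∨ cs.getD j ' ' = '>') ∧
      (cs.take j).count '`' % 2 = 0 ∧ ¬(2 ≤ j ∧ pvTok cs (j - 2))) := by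
  by_cases hj : 2 ≤ j
  · have h1 : ¬ j ≤ 1 := by omega
    simp [pvQ, pvTok, hj]
    tauto
  · have h1 : j ≤ 1 := by omega
    simp [pvQ, pvTok, hj]

-- scanner invariant at a reachable position
def pvH (cs : List Char) (i : Nat) : Prop :=
  (cs.take i).count '`' % 2 = 0 ∧ ∀ t, t < i → i < t + 5 → ¬ pvTok cs t


-- slice equality gives pointwise characters
theorem pvSliceGet (cs l : List Char) (t n k : Nat) (h : (cs.drop t).take n = l) (hk : k < n) :
    cs[t + k]? = l[k]? := by
  have h2 := congrArg (fun xs => xs[k]?) h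
  simp only [List.getElem?_take, hk, if_pos, List.getElem?_drop] at h2
  simpa using h2

theorem pvTok_bound (cs : List Char) (t : Nat) (h : pvTok cs t) : t + 5 ≤ cs.length := by
  rcases h with h | h <;>
  · have := congrArg List.length h
    simp at this
    omega

theorem pvTok_chars (cs : List Char) (t : Nat) (h : pvTok cs t) :
    cs[t]? = some '{' ∧ cs[t+1]? = some '\'' ∧ (cs[t+2]? = some '<' ∨ cs[t+2]? = some '>') ∧
      cs[t+3]? = some '\'' ∧ cs[t+4]? = some '}' := by
  rcases h with h | h
  · refine ⟨?_, ?_, Or.inl ?_, ?_, ?_⟩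
    · have := pvSliceGet cs _ t 5 0 h (by omega); simpa using this
    · exact (pvSliceGet cs _ t 5 1 h (by omega)).trans rfl
    · exact (pvSliceGet cs _ t 5 2 h (by omega)).trans rfl
    · exact (pvSliceGet cs _ t 5 3 h (by omega)).trans rfl
    · exact (pvSliceGet cs _ t 5 4 h (by omega)).trans rfl
  · refine ⟨?_, ?_, Or.inr ?_, ?_, ?_⟩
    · have := pvSliceGet cs _ t 5 0 h (by omega); simpa using this
    · exact (pvSliceGet cs _ t 5 1 h (by omega)).trans rfl
    · exact (pvSliceGet cs _ t 5 2 h (by omega)).trans rfl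
    · exact (pvSliceGet cs _ t 5 3 h (by omega)).trans rfl
    · exact (pvSliceGet cs _ t 5 4 h (by omega)).trans rfl

theorem pvTok_of_chars (cs : List Char) (t : Nat) (_hlen : t + 4 < cs.length)
    (h0 : cs[t]? = some '{') (h1 : cs[t+1]? = some '\'')
    (h2 : cs[t+2]? = some '<' ∨ cs[t+2]? = some '>')
    (h3 : cs[t+3]? = some '\'') (h4 : cs[t+4]? = some '}') : pvTok cs t := by
  rcases h2 with h2 | h2
  · left
    apply List.ext_getElem?
    intro k
    simp only [List.getElem?_take, List.getElem?_drop]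
    match k with
    | 0 => simpa using h0
    | 1 => simpa using h1
    | 2 => simpa using h2
    | 3 => simpa using h3
    | 4 => simpa using h4
    | (m+5) => simp
  · right
    apply List.ext_getElem?
    intro k
    simp only [List.getElem?_take, List.getElem?_drop]
    match k with
    | 0 => simpa using h0
    | 1 => simpa using h1
    | 2 => simpa using h2
    | 3 => simpa using h3
    | 4 => simpa using h4
    | (m+5) => simp

theorem pvCountStep (cs : List Char) (j : Nat) :
    (cs.take (j+1)).count '`' = (cs.take j).count '`' + (if cs[j]? = some '`' then 1 else 0) := by
  rw [List.take_add_one]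
  rcases h : cs[j]? with _ | c
  · simp
  · by_cases hc : c = '`' <;> simp [hc]

theorem pvCountStretch (cs : List Char) (i j : Nat) (hij : i ≤ j)
    (h : ∀ k, i ≤ k → k < j → cs[k]? ≠ some '`') :
    (cs.take j).count '`' = (cs.take i).count '`' := by
  induction j with
  | zero => have : i = 0 := by omega
            simp [this]
  | succ j ih =>
    by_cases hj : i = j + 1
    · simp [hj]
    · have hij' : i ≤ j := by omega
      rw [pvCountStep, ih hij' (fun k hk1 hk2 => h k hk1 (by omega))]
      simp [h j hij' (by omega)]

theorem pvFindTick_ge (cs : List Char) (fuel i : Nat) : i ≤ pvFindTick cs fuel i := by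
  induction fuel generalizing i with
  | zero => simp [pvFindTick]
  | succ fuel ih =>
    rw [pvFindTick]
    split
    · split
      · omega
      · exact le_trans (by omega) (ih (i+1))
    · omega

theorem pvFindTick_le (cs : List Char) (fuel i : Nat) (h : i ≤ cs.length) :
    pvFindTick cs fuel i ≤ cs.length := by
  induction fuel generalizing i with
  | zero => simpa [pvFindTick] using h
  | succ fuel ih =>
    rw [pvFindTick]
    split
    · split
      · omega
      · exact ih (i+1) (by omega)
    · omega

theorem pvFindTick_not (cs : List Char) (fuel i : Nat) :
    ∀ j, i ≤ j → j < pvFindTick cs fuel i → cs[j]? ≠ some '`' := by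
  induction fuel generalizing i with
  | zero => intro j h1 h2; rw [pvFindTick] at h2; omega
  | succ fuel ih =>
    intro j h1 h2
    rw [pvFindTick] at h2
    by_cases hlt : i < cs.length
    · rw [dif_pos hlt] at h2
      by_cases hbt : cs[i] = '`'
      · rw [if_pos hbt] at h2; omega
      · rw [if_neg hbt] at h2
        by_cases hj : j = i
        · subst hj
          rw [List.getElem?_eq_getElem hlt]
          simpa using hbt
        · exact ih (i+1) j (by omega) h2
    · rw [dif_neg hlt] at h2; omega

theorem pvFindTick_tick (cs : List Char) (fuel i : Nat) (hfuel : cs.length ≤ i + fuel)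
    (h : pvFindTick cs fuel i < cs.length) : cs[pvFindTick cs fuel i]? = some '`' := by
  induction fuel generalizing i with
  | zero => rw [pvFindTick] at h; omega
  | succ fuel ih =>
    rw [pvFindTick] at h ⊢
    by_cases hlt : i < cs.length
    · rw [dif_pos hlt] at h ⊢
      by_cases hbt : cs[i] = '`'
      · rw [if_pos hbt] at h ⊢
        rw [List.getElem?_eq_getElem hlt]
        simpa using hbt
      · rw [if_neg hbt] at h ⊢
        exact ih (i+1) (by omega) h
    · rw [dif_neg hlt] at h; omega

theorem pvScanPast (cs : List Char) (fuel j : Nat) (h : cs.length ≤ j) :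
    pvScan cs fuel j = false := by
  cases fuel with
  | zero => rw [pvScan]
  | succ fuel => rw [pvScan, dif_neg (by omega)]

theorem pvGetD (cs : List Char) (j : Nat) (h : j < cs.length) : cs.getD j ' ' = cs[j] := by
  simp [List.getD_eq_getElem?_getD, List.getElem?_eq_getElem h]

theorem pvQ_false_char (cs : List Char) (j : Nat) (h : j < cs.length)
    (hc1 : cs[j] ≠ '<') (hc2 : cs[j] ≠ '>') : pvQ cs j = false := by
  simp [pvQ, List.getElem?_eq_getElem h, hc1, hc2]

theorem pvQ_false_parity (cs : List Char) (j : Nat)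
    (h : (cs.take j).count '`' % 2 = 1) : pvQ cs j = false := by
  have h2 : ¬ (cs.take j).count '`' % 2 = 0 := by omega
  simp [pvQ, h2]

theorem pvQ_false_tok (cs : List Char) (j : Nat) (h2 : 2 ≤ j) (ht : pvTok cs (j - 2)) :
    pvQ cs j = false := by
  rcases ht with ht | ht <;> simp [pvQ, h2, ht]

theorem pvShift (cs : List Char) (i i' : Nat) (hle : i ≤ i')
    (hskip : ∀ j, i ≤ j → j < i' → j < cs.length → pvQ cs j = false) :
    ((∃ j, i ≤ j ∧ j < cs.length ∧ pvQ cs j = true) ↔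
     (∃ j, i' ≤ j ∧ j < cs.length ∧ pvQ cs j = true)) := by
  constructor
  · rintro ⟨j, h1, h2, h3⟩
    by_cases hj : i' ≤ j
    · exact ⟨j, hj, h2, h3⟩
    · rw [hskip j h1 (by omega) h2] at h3; cases h3
  · rintro ⟨j, h1, h2, h3⟩
    exact ⟨j, by omega, h2, h3⟩

theorem pvGetOfOpt (cs : List Char) (j : Nat) (c : Char) (h : j < cs.length)
    (ho : cs[j]? = some c) : cs[j] = c := by
  rw [List.getElem?_eq_getElem h] at ho
  exact Option.some.inj ho

theorem pvMain : ∀ (n : Nat) (cs : List Char) (i : Nat), cs.length ≤ i + n → pvH cs i →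
    (pvScan cs n i = true ↔ ∃ j, i ≤ j ∧ j < cs.length ∧ pvQ cs j = true) := by
  intro n
  induction n with
  | zero =>
    intro cs i hn _
    rw [pvScan]
    constructor
    · intro h; cases h
    · rintro ⟨j, h1, h2, _⟩; omega
  | succ n ih =>
    intro cs i hn hH
    by_cases hi : i < cs.length
    · obtain ⟨hPar, hStrad⟩ := hH
      rw [pvScan, dif_pos hi]
      by_cases hbt : cs[i] = '`'
      · -- code-span case
        rw [if_pos hbt]
        have hfge : i + 1 ≤ pvFindTick cs cs.length (i+1) := pvFindTick_ge cs cs.length (i+1)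
        have hfle : pvFindTick cs cs.length (i+1) ≤ cs.length := pvFindTick_le cs cs.length (i+1) (by omega)
        have hnot : ∀ j, i+1 ≤ j → j < pvFindTick cs cs.length (i+1) → cs[j]? ≠ some '`' :=
          pvFindTick_not cs cs.length (i+1)
        have hcnt_i1 : (cs.take (i+1)).count '`' = (cs.take i).count '`' + 1 := by
          rw [pvCountStep]; simp [List.getElem?_eq_getElem hi, hbt]
        have hskip : ∀ j, i ≤ j → j < pvFindTick cs cs.length (i+1) + 1 → j < cs.length → pvQ cs j = false := by
          intro j h1 h2 h3
          by_cases hji : j = i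
          · subst hji
            exact pvQ_false_char cs j h3 (by rw [hbt]; decide) (by rw [hbt]; decide)
          · by_cases hjf : j = pvFindTick cs cs.length (i+1)
            · have htk := pvFindTick_tick cs cs.length (i+1) (by omega) (hjf ▸ h3)
              rw [← hjf] at htk
              have hc := pvGetOfOpt cs j '`' h3 htk
              exact pvQ_false_char cs j h3 (by rw [hc]; decide) (by rw [hc]; decide)
            · have hcnt_j : (cs.take j).count '`' = (cs.take i).count '`' + 1 := by
                rw [pvCountStretch cs (i+1) j (by omega)
                  (fun k hk1 hk2 => hnot k hk1 (by omega)), hcnt_i1]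
              exact pvQ_false_parity cs j (by omega)
        rw [pvShift cs i (pvFindTick cs cs.length (i+1) + 1) (by omega) hskip]
        by_cases hflt : pvFindTick cs cs.length (i+1) < cs.length
        · apply ih
          · omega
          · constructor
            · have htk := pvFindTick_tick cs cs.length (i+1) (by omega) (by omega)
              have : (cs.take (pvFindTick cs cs.length (i+1) + 1)).count '`' = (cs.take i).count '`' + 2 := by
                rw [pvCountStep, pvCountStretch cs (i+1) (pvFindTick cs cs.length (i+1)) (by omega) hnot,
                  hcnt_i1]
                simp [htk]
              omega
            · intro t ht1 ht2 htok
              obtain ⟨c0, c1, c2, c3, c4⟩ := pvTok_chars cs t htok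
              have htk := pvFindTick_tick cs cs.length (i+1) (by omega) (by omega)
              rcases (show pvFindTick cs cs.length (i+1) = t ∨ pvFindTick cs cs.length (i+1) = t+1 ∨
                  pvFindTick cs cs.length (i+1) = t+2 ∨ pvFindTick cs cs.length (i+1) = t+3 by omega) with h|h|h|h
              · rw [h, c0] at htk; simp at htk
              · rw [h, c1] at htk; simp at htk
              · rcases c2 with c2 | c2 <;> (rw [h, c2] at htk; simp at htk)
              · rw [h, c3] at htk; simp at htk
        · -- unterminated span: scanner runs past the end
          rw [pvScanPast cs n _ (by omega)]
          constructor
          · intro h; cases h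
          · rintro ⟨j, h1, h2, _⟩; omega
      · rw [if_neg hbt]
        by_cases hent : cs[i] = '&' ∧ i + 3 < cs.length ∧
            ((cs.drop i).take 4 = "&lt;".toList ∨ (cs.drop i).take 4 = "&gt;".toList ∨
             (cs.drop i).take 4 = "&amp;".toList ∨ (cs.drop i).take 4 = "&quot;".toList)
        · -- entity case
          rw [if_pos hent]
          obtain ⟨_, hlen3, hd⟩ := hent
          have hdd : (cs.drop i).take 4 = "&lt;".toList ∨ (cs.drop i).take 4 = "&gt;".toList := by
            rcases hd with h|h|h|h
            · exact Or.inl h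
            · exact Or.inr h
            · exfalso; have := congrArg List.length h; simp at this; omega
            · exfalso; have := congrArg List.length h; simp at this; omega
          have hlen4 : ((cs.drop i).take 4).length = 4 := by simp; omega
          rw [hlen4]
          have hch : ∀ k, k < 4 → cs[i+k]? = some '&' ∨ cs[i+k]? = some 'l' ∨
              cs[i+k]? = some 'g' ∨ cs[i+k]? = some 't' ∨ cs[i+k]? = some ';' := by
            intro k hk
            rcases hdd with h|h <;>
            · have hsg := pvSliceGet cs _ i 4 k h hk
              interval_cases k <;> simp_all
          have hskip : ∀ j, i ≤ j → j < i + 4 → j < cs.length → pvQ cs j = false := by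
            intro j h1 h2 h3
            have hj := hch (j - i) (by omega)
            rw [show i + (j - i) = j by omega] at hj
            rw [List.getElem?_eq_getElem h3] at hj
            refine pvQ_false_char cs j h3 ?_ ?_ <;>
              (rcases hj with h|h|h|h|h <;> (rw [Option.some.inj h]; decide))
          rw [pvShift cs i (i+4) (by omega) hskip]
          apply ih
          · omega
          · constructor
            · rw [pvCountStretch cs i (i+4) (by omega) (fun k hk1 hk2 => by
                have hj := hch (k - i) (by omega)
                rw [show i + (k - i) = k by omega] at hj
                rcases hj with h|h|h|h|h <;> simp [h])]
              exact hPar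
            · intro t ht1 ht2 htok
              obtain ⟨c0, _, _, _, _⟩ := pvTok_chars cs t htok
              have hj := hch (t - i) (by omega)
              rw [show i + (t - i) = t by omega] at hj
              rcases hj with h|h|h|h|h <;> (rw [c0] at h; simp at h)
        · rw [if_neg hent]
          by_cases hjsx : cs[i] = '{' ∧ i + 4 < cs.length ∧ cs[i+1]? = some '\'' ∧
              (cs[i+2]? = some '<' ∨ cs[i+2]? = some '>') ∧ cs[i+3]? = some '\'' ∧
              cs[i+4]? = some '}'
          · -- escaped-JSX case
            rw [if_pos hjsx]
            obtain ⟨hbr, hlen4, h1, h2, h3, h4⟩ := hjsx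
            have h0 : cs[i]? = some '{' := by rw [List.getElem?_eq_getElem hi, hbr]
            have htok : pvTok cs i := pvTok_of_chars cs i hlen4 h0 h1 h2 h3 h4
            have hskip : ∀ j, i ≤ j → j < i + 5 → j < cs.length → pvQ cs j = false := by
              intro j hj1 hj2 hj3
              rcases (show j = i ∨ j = i+1 ∨ j = i+2 ∨ j = i+3 ∨ j = i+4 by omega)
                with h|h|h|h|h <;> rw [h]
              · exact pvQ_false_char cs i hi (by rw [hbr]; decide) (by rw [hbr]; decide)
              · have hc := pvGetOfOpt cs (i+1) '\'' (by omega) h1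
                exact pvQ_false_char cs (i+1) (by omega) (by rw [hc]; decide) (by rw [hc]; decide)
              · exact pvQ_false_tok cs (i+2) (by omega) (by rw [show i+2-2 = i by omega]; exact htok)
              · have hc := pvGetOfOpt cs (i+3) '\'' (by omega) h3
                exact pvQ_false_char cs (i+3) (by omega) (by rw [hc]; decide) (by rw [hc]; decide)
              · have hc := pvGetOfOpt cs (i+4) '}' (by omega) h4
                exact pvQ_false_char cs (i+4) (by omega) (by rw [hc]; decide) (by rw [hc]; decide)
            rw [pvShift cs i (i+5) (by omega) hskip]
            apply ih
            · omega
            · constructor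
              · rw [pvCountStretch cs i (i+5) (by omega) (fun k hk1 hk2 => by
                  rcases (show k = i ∨ k = i+1 ∨ k = i+2 ∨ k = i+3 ∨ k = i+4 by omega)
                    with h|h|h|h|h <;> rw [h]
                  · simp [h0]
                  · simp [h1]
                  · rcases h2 with h|h <;> simp [h]
                  · simp [h3]
                  · simp [h4])]
                exact hPar
              · intro t ht1 ht2 htok'
                obtain ⟨c0, _, _, _, _⟩ := pvTok_chars cs t htok'
                rcases (show t = i+1 ∨ t = i+2 ∨ t = i+3 ∨ t = i+4 by omega) with h|h|h|h <;> subst h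
                · rw [c0] at h1; simp at h1
                · rcases h2 with h|h <;> (rw [c0] at h; simp at h)
                · rw [c0] at h3; simp at h3
                · rw [c0] at h4; simp at h4
          · rw [if_neg hjsx]
            by_cases hb : cs[i] = '<' ∨ cs[i] = '>'
            · -- bare < or > found
              rw [if_pos hb]
              constructor
              · intro _
                refine ⟨i, le_refl i, hi, ?_⟩
                rw [pvQ_true_iff]
                refine ⟨?_, hPar, ?_⟩
                · rw [pvGetD cs i hi]; exact hb
                · rintro ⟨h2i, htok⟩
                  exact hStrad (i-2) (by omega) (by omega) htok
              · intro _; rfl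
            · -- ordinary character
              rw [if_neg hb]
              rw [not_or] at hb
              have hskip : ∀ j, i ≤ j → j < i + 1 → j < cs.length → pvQ cs j = false := by
                intro j h1 h2 h3
                have hji : j = i := by omega
                rw [hji]
                exact pvQ_false_char cs i hi hb.1 hb.2
              rw [pvShift cs i (i+1) (by omega) hskip]
              apply ih
              · omega
              · constructor
                · rw [pvCountStretch cs i (i+1) (by omega) (fun k hk1 hk2 => by
                    have hk : k = i := by omega
                    subst hk
                    rw [List.getElem?_eq_getElem hi]
                    simpa using hbt)]
                  exact hPar
                · intro t ht1 ht2 htok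
                  by_cases hti : t = i
                  · subst hti
                    obtain ⟨c0, c1, c2, c3, c4⟩ := pvTok_chars cs t htok
                    have hbnd := pvTok_bound cs t htok
                    exact hjsx ⟨pvGetOfOpt cs t '{' hi c0, by omega, c1, c2, c3, c4⟩
                  · exact hStrad t (by omega) (by omega) htok
    · rw [pvScan, dif_neg hi]
      constructor
      · intro h; cases h
      · rintro ⟨j, h1, h2, _⟩; omega

-- ===== VERDICT (by name: the statement is the Claim_ definition above) =====
theorem needs_mdx_escape_py_spec : Claim_equal_needs_mdx_escape_py := by
  intro line _
  unfold Spec_needs_mdx_escape_py needs_mdx_escape_py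
  rw [pvAlt_eq]
  have h := pvMain (line.toList.length + 1) line.toList 0 (by omega) ⟨by simp, by omega⟩
  rcases Bool.eq_false_or_eq_true (pvScan line.toList (line.toList.length + 1) 0) with hb | hb <;> rw [hb]
  · symm; rw [List.any_eq_true]
    obtain ⟨j, _, hjl, hq⟩ := h.mp hb
    exact ⟨j, List.mem_range.mpr hjl, hq⟩
  · symm; rw [List.any_eq_false]
    intro j hj
    simp only [List.mem_range] at hj
    by_contra hq
    exact absurd (h.mpr ⟨j, by omega, hj, by simpa using hq⟩) (by rw [hb]; simp)
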